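-- pv_equiv track=rewrite | github.com/ChSunayReddy/Python_codes | Cont_prime_str_reverse.py | process_number
-- ===== SOURCE A (Python) =====
-- def is_prime_digit(digit):
--     return digit in '2357'
--
-- def process_number(num_str):
--     result = []
--     current_segment = []
--
--     for digit in num_str:
--         current_segment.append(digit)
--         if is_prime_digit(digit):
--             # Reverse the current segment (excluding the prime digit)
--             result.append(''.join(reversed(current_segment[:-1])))
--             # Add the prime digit itself
--             result.append(digit)
--             # Reset current segment
--             current_segment = []
--
--     # Add remaining digits (if any)
--     result.append(''.join(reversed(current_segment)))
--
--     return ''.join(result)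
-- ===== SOURCE B (Python) =====
-- def process_number(num_str):
--     # Single right-to-left pass: walking backwards makes each non-prime run
--     # come out already reversed, so no reversed()/join bookkeeping is needed.
--     res = ''
--     seg = ''
--     for ch in reversed(num_str):
--         if ch in '2357':
--             res = ch + seg + res
--             seg = ''
--         else:
--             seg = seg + ch
--     return seg + res
-- ===== Notes on version B (the rewrite author's own statement) =====
-- stated objective: alternative
-- what changed: Replaces A's left-to-right scan with a segment buffer, reversed()+join per segment and a final join, by a single right-to-left pass over the string with two string accumulators in which each non-prime run comes out already reversed, so no explicit reversal or join is needed.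
import Mathlib
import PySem

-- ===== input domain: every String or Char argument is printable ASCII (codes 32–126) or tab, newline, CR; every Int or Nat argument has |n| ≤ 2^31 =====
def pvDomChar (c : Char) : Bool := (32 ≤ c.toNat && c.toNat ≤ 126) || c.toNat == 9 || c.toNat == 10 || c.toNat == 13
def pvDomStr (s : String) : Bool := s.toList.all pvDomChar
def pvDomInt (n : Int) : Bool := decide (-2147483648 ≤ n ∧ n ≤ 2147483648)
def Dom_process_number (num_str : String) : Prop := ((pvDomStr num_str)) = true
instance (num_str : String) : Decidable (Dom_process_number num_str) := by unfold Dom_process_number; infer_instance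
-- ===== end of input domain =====

-- B replaces A's left-to-right pass (segment buffer + reversed()+join) by a single
-- right-to-left pass with two string accumulators (objective: alternative/simpler).

-- ===== PORT A =====
-- is_prime_digit(digit): digit in '2357'
def is_prime_digit (digit : Char) : Bool := (['2','3','5','7'] : List Char).contains digit

-- loop body of A: state = (result as list of joined segments (char lists), current_segment)
-- current_segment[:-1] on seg ++ [c] is seg, ported as List.dropLast (exact: [:-1] drops the last element, also [] on []).
def pnStepA (st : List (List Char) × List Char) (digit : Char) : List (List Char) × List Char :=
  let seg := st.2 ++ [digit]
  if is_prime_digit digit then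
    (st.1 ++ [seg.dropLast.reverse, [digit]], [])
  else
    (st.1, seg)

def process_number (num_str : String) : String :=
  let st := num_str.toList.foldl pnStepA ([], [])
  -- result.append(''.join(reversed(current_segment))); return ''.join(result)
  String.ofList ((st.1 ++ [st.2.reverse]).flatten)

-- ===== PORT B =====
-- loop body of B: state = (res, seg) as char lists; iteration is over reversed(num_str)
def pnStepB (st : List Char × List Char) (ch : Char) : List Char × List Char :=
  if (['2','3','5','7'] : List Char).contains ch then
    ([ch] ++ st.2 ++ st.1, [])
  else
    (st.1, st.2 ++ [ch])

def process_number_alt (num_str : String) : String :=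
  let st := num_str.toList.reverse.foldl pnStepB ([], [])
  String.ofList (st.2 ++ st.1)

-- ===== PRECONDITION & SPEC =====
def Spec_process_number (num_str : String) (out : String) : Prop := out = process_number_alt num_str
instance (num_str : String) (out : String) : Decidable (Spec_process_number num_str out) := by unfold Spec_process_number; infer_instance

-- ===== CLAIM (what is proved, stated in full; the proofs are below) =====
def Claim_equal_process_number : Prop := ∀ (num_str : String), Dom_process_number num_str → Spec_process_number num_str (process_number num_str)

-- ===== LEMMAS AND PROOFS =====

-- reference recursion: process rest with pending segment s
def pnG (s : List Char) : List Char → List Char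
  | [] => s.reverse
  | c :: cs => if is_prime_digit c then s.reverse ++ c :: pnG [] cs else pnG (s ++ [c]) cs

-- tail processing after the first non-prime run
def pnTP : List Char → List Char
  | [] => []
  | c :: cs => c :: pnG [] cs

lemma pnA_inv : ∀ (cs : List Char) (res : List (List Char)) (seg : List Char),
    (let st := cs.foldl pnStepA (res, seg); (st.1 ++ [st.2.reverse]).flatten)
      = res.flatten ++ pnG seg cs := by
  intro cs
  induction cs with
  | nil => intro res seg; simp [pnG]
  | cons c cs ih =>
    intro res seg
    by_cases h : is_prime_digit c = true
    · simp only [List.foldl_cons, pnStepA, h, if_pos, pnG]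
      rw [ih]
      simp
    · simp only [List.foldl_cons, pnStepA, pnG, h]
      rw [ih]
      simp

lemma pnG_char : ∀ (cs s : List Char),
    pnG s cs = (cs.takeWhile (fun c => !is_prime_digit c)).reverse ++ s.reverse
        ++ pnTP (cs.dropWhile (fun c => !is_prime_digit c)) := by
  intro cs
  induction cs with
  | nil => intro s; simp [pnG, pnTP]
  | cons c cs ih =>
    intro s
    by_cases h : is_prime_digit c = true
    · simp [pnG, h, pnTP]
    · simp only [pnG, h, if_neg, Bool.not_eq_true]
      rw [ih]
      simp [h]

lemma pnB_inv : ∀ (cs : List Char),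
    cs.foldr (fun c st => pnStepB st c) (([], []) : List Char × List Char)
      = (pnTP (cs.dropWhile (fun c => !is_prime_digit c)),
         (cs.takeWhile (fun c => !is_prime_digit c)).reverse) := by
  intro cs
  induction cs with
  | nil => simp [pnTP]
  | cons c cs ih =>
    rw [List.foldr_cons, ih]
    simp only [pnStepB,
      show ∀ x, ((['2','3','5','7'] : List Char).contains x) = is_prime_digit x from
        fun _ => rfl]
    by_cases h : is_prime_digit c = true
    · simp [h, pnTP, pnG_char cs []]
    · simp [h]

lemma pn_list_eq (cs : List Char) :
    ((cs.foldl pnStepA ([], [])).1 ++ [(cs.foldl pnStepA ([], [])).2.reverse]).flatten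
      = (cs.reverse.foldl pnStepB ([], [])).2 ++ (cs.reverse.foldl pnStepB ([], [])).1 := by
  have hA := pnA_inv cs [] []
  simp only at hA
  rw [hA, List.foldl_reverse, pnB_inv cs]
  simp [pnG_char cs []]

-- ===== VERDICT (by name: the statement is the Claim_ definition above) =====
theorem process_number_spec : Claim_equal_process_number := by
  intro num_str _
  show String.ofList (((num_str.toList.foldl pnStepA ([], [])).1
        ++ [(num_str.toList.foldl pnStepA ([], [])).2.reverse]).flatten)
      = String.ofList ((num_str.toList.reverse.foldl pnStepB ([], [])).2
        ++ (num_str.toList.reverse.foldl pnStepB ([], [])).1)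
  rw [pn_list_eq]
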